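-- pv_equiv track=rewrite | github.com/David-Hatcher/AoC2021 | Day 19/Day19.py | mapScannerAToB
-- ===== SOURCE A (Python) =====
-- rotations = [([2, 0, 1], [-1, -1, 1]), ([0, 1, 2], [1, -1, -1]), ([2, 1, 0], [-1, -1, -1]), ([2, 1, 0], [1, -1, 1]),
--             ([0, 2, 1], [-1, -1, -1]), ([1, 2, 0], [1, -1, -1]), ([1, 0, 2], [-1, -1, -1]), ([1, 2, 0], [1, 1, 1]),
--             ([0, 2, 1], [-1, 1, 1]), ([0, 1, 2], [-1, 1, -1]), ([0, 2, 1], [1, -1, 1]), ([2, 0, 1], [-1, 1, -1]),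
--             ([1, 0, 2], [1, 1, -1]), ([2, 1, 0], [1, 1, -1]), ([2, 0, 1], [1, 1, 1]), ([2, 1, 0], [-1, 1, 1]),
--             ([0, 1, 2], [1, 1, 1]), ([1, 0, 2], [1, -1, 1]), ([1, 0, 2], [-1, 1, 1]), ([0, 1, 2], [-1, -1, 1]),
--             ([1, 2, 0], [-1, 1, -1]), ([1, 2, 0], [-1, -1, 1]), ([0, 2, 1], [1, 1, -1]), ([2, 0, 1], [1, -1, -1])]
--
-- def mapScannerAToB(pointsA, pointsB):
--     aTranspose = list(zip(*pointsA))
--     bTranspose = list(zip(*pointsB))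
--     for perms, signs in rotations:
--         rotated = rotate(bTranspose, perms, signs)
--         offset = []
--         for p in zip(rotated, aTranspose):
--             points = set([x[1] - x[0] for x in zip(p[0], p[1])])
--             if len(points) == 1:
--                 offset.append(points.pop())
--             if len(offset) == 3:
--                 return offset, perms, signs
--     return None
--
-- def rotate(point, perms, signs):
--     return map(lambda n: n * signs[0], point[perms[0]]), \
--            map(lambda n: n * signs[1], point[perms[1]]), \
--            map(lambda n: n * signs[2], point[perms[2]])
-- ===== SOURCE B (Python) =====
-- rotations = [([2, 0, 1], [-1, -1, 1]), ([0, 1, 2], [1, -1, -1]), ([2, 1, 0], [-1, -1, -1]), ([2, 1, 0], [1, -1, 1]),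
--             ([0, 2, 1], [-1, -1, -1]), ([1, 2, 0], [1, -1, -1]), ([1, 0, 2], [-1, -1, -1]), ([1, 2, 0], [1, 1, 1]),
--             ([0, 2, 1], [-1, 1, 1]), ([0, 1, 2], [-1, 1, -1]), ([0, 2, 1], [1, -1, 1]), ([2, 0, 1], [-1, 1, -1]),
--             ([1, 0, 2], [1, 1, -1]), ([2, 1, 0], [1, 1, -1]), ([2, 0, 1], [1, 1, 1]), ([2, 1, 0], [-1, 1, 1]),
--             ([0, 1, 2], [1, 1, 1]), ([1, 0, 2], [1, -1, 1]), ([1, 0, 2], [-1, 1, 1]), ([0, 1, 2], [-1, -1, 1]),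
--             ([1, 2, 0], [-1, 1, -1]), ([1, 2, 0], [-1, -1, 1]), ([0, 2, 1], [1, 1, -1]), ([2, 0, 1], [1, -1, -1])]
--
-- def _offset(pair, perms, signs):
--     pa, pb = pair
--     return tuple(pa[i] - signs[i] * pb[perms[i]] for i in range(3))
--
-- def mapScannerAToB(pointsA, pointsB):
--     # Candidate-and-verify: take the offset vector of the first pair and check
--     # every pair reproduces it, instead of A's transpose + per-axis set scan.
--     pairs = list(zip(pointsA, pointsB))
--     if not pairs:
--         return None
--     hit = next(((perms, signs) for perms, signs in rotations
--                 if all(_offset(p, perms, signs) == _offset(pairs[0], perms, signs)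
--                        for p in pairs)),
--                None)
--     if hit is None:
--         return None
--     perms, signs = hit
--     return list(_offset(pairs[0], perms, signs)), perms, signs
-- ===== Notes on version B (the rewrite author's own statement) =====
-- stated objective: simpler
-- what changed: B drops A's transpose/rotate machinery and per-axis difference-set scan with an offset accumulator, instead taking the first pair's offset vector as a candidate and verifying with a single all() pass (early exit on the first mismatching pair) that every pair reproduces it, returning via next() over the rotation list.
import Mathlib
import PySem

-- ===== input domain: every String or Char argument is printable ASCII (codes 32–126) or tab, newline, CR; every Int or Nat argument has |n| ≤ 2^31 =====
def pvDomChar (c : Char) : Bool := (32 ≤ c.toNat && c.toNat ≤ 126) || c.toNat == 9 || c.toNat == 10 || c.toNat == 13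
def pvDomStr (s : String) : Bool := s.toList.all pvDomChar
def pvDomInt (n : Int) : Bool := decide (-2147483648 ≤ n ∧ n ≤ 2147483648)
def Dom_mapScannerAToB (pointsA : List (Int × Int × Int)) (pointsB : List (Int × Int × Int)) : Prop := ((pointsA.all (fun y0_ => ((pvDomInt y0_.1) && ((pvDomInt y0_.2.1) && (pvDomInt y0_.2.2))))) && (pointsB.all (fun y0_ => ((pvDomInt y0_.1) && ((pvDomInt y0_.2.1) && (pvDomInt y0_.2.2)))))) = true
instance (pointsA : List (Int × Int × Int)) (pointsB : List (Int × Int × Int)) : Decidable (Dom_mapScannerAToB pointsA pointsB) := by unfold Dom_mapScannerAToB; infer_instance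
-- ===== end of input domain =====

-- B replaces A's transpose + per-axis difference-set scan by a candidate-and-verify pass:
-- take the first pair's offset vector and check every pair reproduces it (objective: simpler).


-- the module constant `rotations` (shared by both Python versions)
def rotations : List (List Int × List Int) :=
  [([2, 0, 1], [-1, -1, 1]), ([0, 1, 2], [1, -1, -1]), ([2, 1, 0], [-1, -1, -1]), ([2, 1, 0], [1, -1, 1]),
   ([0, 2, 1], [-1, -1, -1]), ([1, 2, 0], [1, -1, -1]), ([1, 0, 2], [-1, -1, -1]), ([1, 2, 0], [1, 1, 1]),
   ([0, 2, 1], [-1, 1, 1]), ([0, 1, 2], [-1, 1, -1]), ([0, 2, 1], [1, -1, 1]), ([2, 0, 1], [-1, 1, -1]),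
   ([1, 0, 2], [1, 1, -1]), ([2, 1, 0], [1, 1, -1]), ([2, 0, 1], [1, 1, 1]), ([2, 1, 0], [-1, 1, 1]),
   ([0, 1, 2], [1, 1, 1]), ([1, 0, 2], [1, -1, 1]), ([1, 0, 2], [-1, 1, 1]), ([0, 1, 2], [-1, -1, 1]),
   ([1, 2, 0], [-1, 1, -1]), ([1, 2, 0], [-1, -1, 1]), ([0, 2, 1], [1, 1, -1]), ([2, 0, 1], [1, -1, -1])]

-- ===== PORT A =====
-- list(zip(*points)) for a list of 3-tuples: [] when points is empty, else the three columns
def pyTranspose3 (ps : List (Int × Int × Int)) : List (List Int) :=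
  if ps.isEmpty then []
  else [ps.map (fun p => p.1), ps.map (fun p => p.2.1), ps.map (fun p => p.2.2)]

-- rotate(point, perms, signs); point[perms[i]] raises IndexError in Python when point = []
-- (that input is excluded by Pre_, so the .getD defaults below are never reached there)
def rotateA (point : List (List Int)) (perms signs : List Int) : List (List Int) :=
  [((PySem.List.pyGet? point ((PySem.List.pyGet? perms 0).getD 0)).getD []).map
      (fun n => n * ((PySem.List.pyGet? signs 0).getD 0)),
   ((PySem.List.pyGet? point ((PySem.List.pyGet? perms 1).getD 0)).getD []).map
      (fun n => n * ((PySem.List.pyGet? signs 1).getD 0)),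
   ((PySem.List.pyGet? point ((PySem.List.pyGet? perms 2).getD 0)).getD []).map
      (fun n => n * ((PySem.List.pyGet? signs 2).getD 0))]

-- the inner `for p in zip(rotated, aTranspose)` loop with the `offset` accumulator and early return
def innerA (perms signs : List Int) :
    List (List Int × List Int) → List Int → Option (List Int × List Int × List Int)
  | [], _ => none
  | p :: rest, offset =>
    let points : PySem.Set Int := PySem.Set.ofList ((p.1.zip p.2).map (fun x => x.2 - x.1))
    let offset' := if points.length = 1 then offset ++ [points.headD 0] else offset
    if offset'.length = 3 then some (offset', perms, signs)
    else innerA perms signs rest offset'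

-- the outer `for perms, signs in rotations` loop
def outerA (aT bT : List (List Int)) :
    List (List Int × List Int) → Option (List Int × List Int × List Int)
  | [] => none
  | (perms, signs) :: rest =>
    match innerA perms signs ((rotateA bT perms signs).zip aT) [] with
    | some r => some r
    | none => outerA aT bT rest

def mapScannerAToB (pointsA : List (Int × Int × Int)) (pointsB : List (Int × Int × Int)) :
    Option (List Int × List Int × List Int) :=
  outerA (pyTranspose3 pointsA) (pyTranspose3 pointsB) rotations

-- ===== PORT B =====
-- signs[i] / perms[i] (always in range for the rotation constants)
def idx3 (xs : List Int) (i : Int) : Int := (PySem.List.pyGet? xs i).getD 0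

-- pb[j] for a 3-tuple pb and j ∈ {0,1,2}
def comp3 (p : Int × Int × Int) (j : Int) : Int :=
  if j = 0 then p.1 else if j = 1 then p.2.1 else p.2.2

-- _offset(pair, perms, signs) = tuple(pa[i] - signs[i]*pb[perms[i]] for i in range(3))
def pvOff (pr : (Int × Int × Int) × (Int × Int × Int)) (perms signs : List Int) :
    Int × Int × Int :=
  (comp3 pr.1 0 - idx3 signs 0 * comp3 pr.2 (idx3 perms 0),
   comp3 pr.1 1 - idx3 signs 1 * comp3 pr.2 (idx3 perms 1),
   comp3 pr.1 2 - idx3 signs 2 * comp3 pr.2 (idx3 perms 2))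

def mapScannerAToB_alt (pointsA : List (Int × Int × Int)) (pointsB : List (Int × Int × Int)) :
    Option (List Int × List Int × List Int) :=
  match pointsA.zip pointsB with
  | [] => none
  | q0 :: rest =>
    match rotations.find? (fun r =>
        (q0 :: rest).all (fun p => pvOff p r.1 r.2 == pvOff q0 r.1 r.2)) with
    | none => none
    | some (perms, signs) =>
      let c := pvOff q0 perms signs
      some ([c.1, c.2.1, c.2.2], perms, signs)

-- ===== PRECONDITION & SPEC =====
-- Pre_ excludes exactly pointsB = [], where A raises IndexError (rotate indexes the empty
-- transpose); B naturally returns none there. No input on which A returns is excluded.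
def Pre_mapScannerAToB (pointsA : List (Int × Int × Int)) (pointsB : List (Int × Int × Int)) : Prop :=
  pointsB ≠ []
instance (pointsA : List (Int × Int × Int)) (pointsB : List (Int × Int × Int)) : Decidable (Pre_mapScannerAToB pointsA pointsB) := by unfold Pre_mapScannerAToB; infer_instance

def pvWitness_mapScannerAToB : (List (Int × Int × Int)) × (List (Int × Int × Int)) :=
  ([(1, 2, 3)], [(3, -2, 1)])

def Spec_mapScannerAToB (pointsA : List (Int × Int × Int)) (pointsB : List (Int × Int × Int)) (out : Option (List Int × List Int × List Int)) : Prop := out = mapScannerAToB_alt pointsA pointsB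
instance (pointsA : List (Int × Int × Int)) (pointsB : List (Int × Int × Int)) (out : Option (List Int × List Int × List Int)) : Decidable (Spec_mapScannerAToB pointsA pointsB out) := by unfold Spec_mapScannerAToB; infer_instance

-- ===== CLAIM (what is proved, stated in full; the proofs are below) =====
def Claim_equal_mapScannerAToB : Prop := ∀ (pointsA : List (Int × Int × Int)) (pointsB : List (Int × Int × Int)), Dom_mapScannerAToB pointsA pointsB → Pre_mapScannerAToB pointsA pointsB → Spec_mapScannerAToB pointsA pointsB (mapScannerAToB pointsA pointsB)

-- ===== LEMMAS AND PROOFS =====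

-- proof-side abbreviation: the multiset of per-point offset vectors A's axis sets decompose
def offsL (pointsA pointsB : List (Int × Int × Int)) (p0 p1 p2 s0 s1 s2 : Int) :
    List (Int × Int × Int) :=
  (pointsA.zip pointsB).map (fun q =>
    (q.1.1 - s0 * comp3 q.2 p0, q.1.2.1 - s1 * comp3 q.2 p1, q.1.2.2 - s2 * comp3 q.2 p2))

lemma pvConstSingleton {α : Type} [BEq α] [LawfulBEq α] {xs : List α} {a : α}
    (hne : xs ≠ []) (h : ∀ y ∈ xs, y = a) : PySem.Set.ofList xs = [a] := by
  induction xs with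
  | nil => simp at hne
  | cons b rest ih =>
    have hb : b = a := h b (by simp)
    by_cases hr : rest = []
    · subst hr hb; rfl
    · have := ih hr (fun y hy => h y (by simp [hy]))
      rw [PySem.Set.ofList_cons, this, hb]
      simp [PySem.Set.discard]

lemma pvLenOneConst {α : Type} [BEq α] [LawfulBEq α] {xs : List α}
    (h : (PySem.Set.ofList xs).length = 1) : ∃ a, (∀ y ∈ xs, y = a) ∧ xs ≠ [] := by
  rcases List.length_eq_one_iff.mp h with ⟨a, ha⟩
  refine ⟨a, fun y hy => ?_, ?_⟩
  · have : y ∈ PySem.Set.ofList xs := (PySem.Set.mem_ofList xs y).mpr hy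
    rw [ha] at this; simpa using this
  · rintro rfl; simp [PySem.Set.ofList_nil] at ha

-- zip-of-columns difference list = row-wise difference list
lemma pvDiffEq (f g : (Int × Int × Int) → Int) (la lb : List (Int × Int × Int)) :
    ((lb.map g).zip (la.map f)).map (fun x => x.2 - x.1)
      = (la.zip lb).map (fun q => f q.1 - g q.2) := by
  induction la generalizing lb with
  | nil => cases lb <;> simp
  | cons a as ih => cases lb <;> simp [ih]

-- A's inner loop on a 3-element list is "all three sets singletons"
lemma innerA_three (perms signs : List Int) (x0 x1 x2 : List Int × List Int) :
    innerA perms signs [x0, x1, x2] [] =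
      (if ((PySem.Set.ofList ((x0.1.zip x0.2).map (fun x => x.2 - x.1))).length = 1
          ∧ (PySem.Set.ofList ((x1.1.zip x1.2).map (fun x => x.2 - x.1))).length = 1
          ∧ (PySem.Set.ofList ((x2.1.zip x2.2).map (fun x => x.2 - x.1))).length = 1)
       then some ([(PySem.Set.ofList ((x0.1.zip x0.2).map (fun x => x.2 - x.1))).headD 0,
                   (PySem.Set.ofList ((x1.1.zip x1.2).map (fun x => x.2 - x.1))).headD 0,
                   (PySem.Set.ofList ((x2.1.zip x2.2).map (fun x => x.2 - x.1))).headD 0],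
                  perms, signs)
       else none) := by
  by_cases c0 : (PySem.Set.ofList ((x0.1.zip x0.2).map (fun x => x.2 - x.1))).length = 1 <;>
  by_cases c1 : (PySem.Set.ofList ((x1.1.zip x1.2).map (fun x => x.2 - x.1))).length = 1 <;>
  by_cases c2 : (PySem.Set.ofList ((x2.1.zip x2.2).map (fun x => x.2 - x.1))).length = 1 <;>
  simp [innerA, c0, c1, c2]

-- a column of the transpose, selected by a valid index, is a row-wise component map
lemma pvColEq (pB : List (Int × Int × Int)) (hB : pB ≠ []) (p : Int)
    (hp : p = 0 ∨ p = 1 ∨ p = 2) :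
    (PySem.List.pyGet? (pyTranspose3 pB) p).getD []
      = pB.map (fun b => comp3 b p) := by
  have hE : pB.isEmpty = false := by simpa using hB
  rcases hp with h | h | h <;> subst h <;>
    simp [pyTranspose3, hE, comp3, PySem.List.pyGet?, PySem.List.pyIdx?]

lemma rotateA_eq (pB : List (Int × Int × Int)) (hB : pB ≠ []) (p0 p1 p2 s0 s1 s2 : Int)
    (h0 : p0 = 0 ∨ p0 = 1 ∨ p0 = 2) (h1 : p1 = 0 ∨ p1 = 1 ∨ p1 = 2)
    (h2 : p2 = 0 ∨ p2 = 1 ∨ p2 = 2) :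
    rotateA (pyTranspose3 pB) [p0, p1, p2] [s0, s1, s2]
      = [pB.map (fun b => comp3 b p0 * s0),
         pB.map (fun b => comp3 b p1 * s1),
         pB.map (fun b => comp3 b p2 * s2)] := by
  simp [rotateA,
        pvColEq pB hB p0 h0, pvColEq pB hB p1 h1, pvColEq pB hB p2 h2,
        List.map_map, Function.comp]

-- one rotation: A's per-axis scan = singleton test on the offset-vector set
lemma stepA_eq (pA pB : List (Int × Int × Int)) (hB : pB ≠ []) (p0 p1 p2 s0 s1 s2 : Int)
    (h0 : p0 = 0 ∨ p0 = 1 ∨ p0 = 2) (h1 : p1 = 0 ∨ p1 = 1 ∨ p1 = 2)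
    (h2 : p2 = 0 ∨ p2 = 1 ∨ p2 = 2) :
    innerA [p0, p1, p2] [s0, s1, s2]
        ((rotateA (pyTranspose3 pB) [p0, p1, p2] [s0, s1, s2]).zip (pyTranspose3 pA)) []
      = (if (PySem.Set.ofList (offsL pA pB p0 p1 p2 s0 s1 s2)).length = 1 then
           some ([((PySem.Set.ofList (offsL pA pB p0 p1 p2 s0 s1 s2)).headD (0, 0, 0)).1,
                  ((PySem.Set.ofList (offsL pA pB p0 p1 p2 s0 s1 s2)).headD (0, 0, 0)).2.1,
                  ((PySem.Set.ofList (offsL pA pB p0 p1 p2 s0 s1 s2)).headD (0, 0, 0)).2.2],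
                 [p0, p1, p2], [s0, s1, s2])
         else none) := by
  rcases pA with _ | ⟨a, as⟩
  · simp [pyTranspose3, innerA, offsL, PySem.Set.ofList_nil]
  · rw [rotateA_eq pB hB p0 p1 p2 s0 s1 s2 h0 h1 h2]
    have hT : pyTranspose3 (a :: as)
        = [(a :: as).map (fun p => p.1), (a :: as).map (fun p => p.2.1),
           (a :: as).map (fun p => p.2.2)] := by simp [pyTranspose3]
    rw [hT]
    show innerA _ _ [(pB.map (fun b => comp3 b p0 * s0), (a :: as).map (fun p => p.1)),
                     (pB.map (fun b => comp3 b p1 * s1), (a :: as).map (fun p => p.2.1)),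
                     (pB.map (fun b => comp3 b p2 * s2), (a :: as).map (fun p => p.2.2))] [] = _
    rw [innerA_three]
    set L := offsL (a :: as) pB p0 p1 p2 s0 s1 s2 with hLdef
    have e0 : ((pB.map (fun b => comp3 b p0 * s0)).zip ((a :: as).map (fun p => p.1))).map
        (fun x => x.2 - x.1) = L.map (fun v => v.1) := by
      rw [pvDiffEq (fun p => p.1) (fun b => comp3 b p0 * s0), hLdef, offsL, List.map_map]
      simp [Function.comp, mul_comm]
    have e1 : ((pB.map (fun b => comp3 b p1 * s1)).zip ((a :: as).map (fun p => p.2.1))).map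
        (fun x => x.2 - x.1) = L.map (fun v => v.2.1) := by
      rw [pvDiffEq (fun p => p.2.1) (fun b => comp3 b p1 * s1), hLdef, offsL, List.map_map]
      simp [Function.comp, mul_comm]
    have e2 : ((pB.map (fun b => comp3 b p2 * s2)).zip ((a :: as).map (fun p => p.2.2))).map
        (fun x => x.2 - x.1) = L.map (fun v => v.2.2) := by
      rw [pvDiffEq (fun p => p.2.2) (fun b => comp3 b p2 * s2), hLdef, offsL, List.map_map]
      simp [Function.comp, mul_comm]
    simp only [e0, e1, e2]
    have hLne : L ≠ [] := by
      rcases pB with _ | ⟨b, bs⟩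
      · exact absurd rfl hB
      · simp [hLdef, offsL]
    by_cases hconst : ∀ y ∈ L, y = L.head hLne
    · set c := L.head hLne with hc
      have hS : PySem.Set.ofList L = [c] := pvConstSingleton hLne hconst
      have proj : ∀ (f : Int × Int × Int → Int),
          PySem.Set.ofList (L.map f) = [f c] := by
        intro f
        refine pvConstSingleton (by simp [hLne]) ?_
        intro y hy
        rcases List.mem_map.mp hy with ⟨z, hz, rfl⟩
        rw [hconst z hz]
      rw [hS, proj (fun v => v.1), proj (fun v => v.2.1), proj (fun v => v.2.2)]
      simp
    · have hnotS : ¬ (PySem.Set.ofList L).length = 1 := by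
        intro h
        rcases pvLenOneConst h with ⟨v, hv, -⟩
        exact hconst fun y hy => (hv y hy).trans (hv _ (List.head_mem hLne)).symm
      have hnot3 : ¬ ((PySem.Set.ofList (L.map (fun v => v.1))).length = 1
          ∧ (PySem.Set.ofList (L.map (fun v => v.2.1))).length = 1
          ∧ (PySem.Set.ofList (L.map (fun v => v.2.2))).length = 1) := by
        rintro ⟨c0, c1, c2⟩
        rcases pvLenOneConst c0 with ⟨a0, hv0, -⟩
        rcases pvLenOneConst c1 with ⟨a1, hv1, -⟩
        rcases pvLenOneConst c2 with ⟨a2, hv2, -⟩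
        refine hconst fun y hy => ?_
        have key : ∀ z ∈ L, z = (a0, a1, a2) := by
          intro z hz
          have z0 := hv0 z.1 (List.mem_map.mpr ⟨z, hz, rfl⟩)
          have z1 := hv1 z.2.1 (List.mem_map.mpr ⟨z, hz, rfl⟩)
          have z2 := hv2 z.2.2 (List.mem_map.mpr ⟨z, hz, rfl⟩)
          exact Prod.ext z0 (Prod.ext z1 z2)
        rw [key y hy, key _ (List.head_mem hLne)]
      simp [hnotS, hnot3]

-- B's row-wise offset for list perms/signs of the shape the constants have
lemma pvOff_eq (pr : (Int × Int × Int) × (Int × Int × Int)) (p0 p1 p2 s0 s1 s2 : Int) :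
    pvOff pr [p0, p1, p2] [s0, s1, s2]
      = (pr.1.1 - s0 * comp3 pr.2 p0, pr.1.2.1 - s1 * comp3 pr.2 p1,
         pr.1.2.2 - s2 * comp3 pr.2 p2) := by
  simp [pvOff, idx3, comp3, PySem.List.pyGet?, PySem.List.pyIdx?]

-- the singleton test on the offset-vector set = B's all-equal-to-first test
lemma single_iff_all (q0 : (Int × Int × Int) × (Int × Int × Int))
    (rest : List ((Int × Int × Int) × (Int × Int × Int)))
    (off : ((Int × Int × Int) × (Int × Int × Int)) → Int × Int × Int) :
    let L := ((q0 :: rest).map off)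
    ((PySem.Set.ofList L).length = 1 ↔
        ((q0 :: rest).all (fun p => off p == off q0)) = true)
      ∧ (((q0 :: rest).all (fun p => off p == off q0)) = true →
          (PySem.Set.ofList L).headD (0, 0, 0) = off q0) := by
  intro L
  have hLne : L ≠ [] := by simp [L]
  constructor
  · constructor
    · intro h
      rcases pvLenOneConst h with ⟨a, ha, -⟩
      have hq : off q0 = a := ha _ (by simp [L])
      simp only [List.all_eq_true, beq_iff_eq]
      intro p hp
      rw [ha (off p) (List.mem_map.mpr ⟨p, hp, rfl⟩), hq]
    · intro h
      have : PySem.Set.ofList L = [off q0] := by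
        refine pvConstSingleton hLne ?_
        intro y hy
        rcases List.mem_map.mp hy with ⟨z, hz, rfl⟩
        simpa using (List.all_eq_true.mp h) z hz
      simp [this]
  · intro h
    have : PySem.Set.ofList L = [off q0] := by
      refine pvConstSingleton hLne ?_
      intro y hy
      rcases List.mem_map.mp hy with ⟨z, hz, rfl⟩
      simpa using (List.all_eq_true.mp h) z hz
    simp [this]

-- the valid rotation shapes
def Rot3 (r : List Int × List Int) : Prop :=
  ∃ p0 p1 p2 s0 s1 s2 : Int, r = ([p0, p1, p2], [s0, s1, s2])
    ∧ (p0 = 0 ∨ p0 = 1 ∨ p0 = 2) ∧ (p1 = 0 ∨ p1 = 1 ∨ p1 = 2) ∧ (p2 = 0 ∨ p2 = 1 ∨ p2 = 2)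

lemma rot3_all : ∀ r ∈ rotations, Rot3 r := by
  intro r hr
  fin_cases hr <;> exact ⟨_, _, _, _, _, _, rfl, by norm_num, by norm_num, by norm_num⟩

-- pointsA empty: A's inner zip is empty for every rotation, so the whole loop yields none
lemma outerA_nilA (bT : List (List Int)) (rots : List (List Int × List Int)) :
    outerA [] bT rots = none := by
  induction rots with
  | nil => rfl
  | cons r rest ih =>
    obtain ⟨perms, signs⟩ := r
    simp [outerA, innerA, ih]

-- rotation by rotation: A's outer loop = B's find?-based search
lemma loops_eq (a : Int × Int × Int) (as pB : List (Int × Int × Int)) (hB : pB ≠ [])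
    (q0 : (Int × Int × Int) × (Int × Int × Int)) (rest : List ((Int × Int × Int) × (Int × Int × Int)))
    (hz : (a :: as).zip pB = q0 :: rest)
    (rots : List (List Int × List Int)) (hval : ∀ r ∈ rots, Rot3 r) :
    outerA (pyTranspose3 (a :: as)) (pyTranspose3 pB) rots
      = (match rots.find? (fun r =>
            (q0 :: rest).all (fun p => pvOff p r.1 r.2 == pvOff q0 r.1 r.2)) with
         | none => none
         | some (perms, signs) =>
           some ([(pvOff q0 perms signs).1, (pvOff q0 perms signs).2.1,
                  (pvOff q0 perms signs).2.2], perms, signs)) := by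
  induction rots with
  | nil => simp [outerA]
  | cons r rrest ih =>
    rcases hval r (by simp) with ⟨p0, p1, p2, s0, s1, s2, hre, v0, v1, v2⟩
    subst hre
    have hstep := stepA_eq (a :: as) pB hB p0 p1 p2 s0 s1 s2 v0 v1 v2
    have hLz : offsL (a :: as) pB p0 p1 p2 s0 s1 s2
        = (q0 :: rest).map (fun pr => pvOff pr [p0, p1, p2] [s0, s1, s2]) := by
      simp [offsL, hz, pvOff_eq]
    rw [hLz] at hstep
    have hsa := single_iff_all q0 rest
      (fun pr => pvOff pr [p0, p1, p2] [s0, s1, s2])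
    simp only at hsa
    by_cases hc : ((q0 :: rest).all
        (fun p => pvOff p [p0, p1, p2] [s0, s1, s2] == pvOff q0 [p0, p1, p2] [s0, s1, s2])) = true
    · rw [if_pos (hsa.1.mpr hc), hsa.2 hc] at hstep
      simp only [outerA, hstep, List.find?, hc]
    · rw [if_neg (fun h => hc (hsa.1.mp h))] at hstep
      simp only [outerA, hstep, List.find?, hc]
      exact ih (fun x hx => hval x (by simp [hx]))

-- ===== VERDICT (by name: the statement is the Claim_ definition above) =====

theorem mapScannerAToB_spec : Claim_equal_mapScannerAToB := by
  intro pA pB _ hB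
  unfold Spec_mapScannerAToB mapScannerAToB mapScannerAToB_alt
  rcases pA with _ | ⟨a, as⟩
  · rw [show pyTranspose3 [] = [] from rfl, outerA_nilA]; simp
  · rcases pB with _ | ⟨b, bs⟩
    · exact absurd rfl hB
    · have hz : (a :: as).zip (b :: bs) = (a, b) :: as.zip bs := rfl
      rw [loops_eq a as (b :: bs) hB (a, b) (as.zip bs) hz rotations rot3_all]
      simp [hz]
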